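-- pv_equiv track=rewrite | github.com/mchouza/mchouza | misc/bounded_iteration/possible_examples.py | shr_one
-- ===== SOURCE A (Python) =====
-- def shr_one(a):
--     c = 0
--     for i in range(a):
--         if c == a:
--             return i
--         c += 1
--         if c == a:
--             return i
--         c += 1
--     return 0
-- ===== SOURCE B (Python) =====
-- def shr_one(a):
--     return a // 2 if a > 0 else 0
-- ===== Notes on version B (the rewrite author's own statement) =====
-- stated objective: faster
-- what changed: Replaced A's linear counting loop (incrementing a counter by two per iteration until it meets the argument) with a closed-form floor halving of positive arguments.
import Mathlib
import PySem

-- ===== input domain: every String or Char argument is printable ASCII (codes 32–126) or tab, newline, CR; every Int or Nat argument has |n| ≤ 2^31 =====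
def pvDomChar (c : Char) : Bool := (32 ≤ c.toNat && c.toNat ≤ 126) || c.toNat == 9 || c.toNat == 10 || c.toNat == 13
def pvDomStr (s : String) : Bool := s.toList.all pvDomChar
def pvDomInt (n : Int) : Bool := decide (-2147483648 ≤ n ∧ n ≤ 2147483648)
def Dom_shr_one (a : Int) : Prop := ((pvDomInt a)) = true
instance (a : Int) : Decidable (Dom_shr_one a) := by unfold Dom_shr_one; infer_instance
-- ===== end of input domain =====

-- B replaces A's O(a) counting loop with the closed form a // 2 (0 for a ≤ 0): faster.

-- ===== PORT A =====
-- the for-loop of A: iterates over range(a) carrying counter c, with the two early returns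
def shr_one_loop (a : Int) : List Int → Int → Int
  | [], _ => 0
  | i :: rest, c =>
    if c = a then i
    else if c + 1 = a then i
    else shr_one_loop a rest (c + 2)

def shr_one (a : Int) : Int :=
  shr_one_loop a (PySem.List.pyRange 0 a 1) 0

-- ===== PORT B =====
def shr_one_alt (a : Int) : Int :=
  if a > 0 then PySem.Int.floordiv a 2 else 0

-- ===== PRECONDITION & SPEC =====
def Spec_shr_one (a : Int) (out : Int) : Prop := out = shr_one_alt a
instance (a : Int) (out : Int) : Decidable (Spec_shr_one a out) := by unfold Spec_shr_one; infer_instance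

-- ===== CLAIM (what is proved, stated in full; the proofs are below) =====
def Claim_equal_shr_one : Prop := ∀ (a : Int), Dom_shr_one a → Spec_shr_one a (shr_one a)

-- ===== LEMMAS AND PROOFS =====

theorem shr_one_loop_inv (a : Int) (ha : 0 < a) (k : Int) (hk : 0 ≤ k) (h2 : 2 * k ≤ a) :
    shr_one_loop a (PySem.List.pyRange k a 1) (2 * k) = PySem.Int.floordiv a 2 := by
  have hka : k < a := by omega
  rw [PySem.List.pyRange_one_cons hka]
  rw [shr_one_loop]
  split_ifs with h1 h3
  · rw [eq_comm, PySem.Int.floordiv_eq_iff_of_pos (by omega)]; omega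
  · rw [eq_comm, PySem.Int.floordiv_eq_iff_of_pos (by omega)]; omega
  · have : 2 * k + 2 = 2 * (k + 1) := by ring
    rw [this]
    exact shr_one_loop_inv a ha (k + 1) (by omega) (by omega)
termination_by (a - k).toNat
decreasing_by omega

theorem shr_one_spec : Claim_equal_shr_one := by
  intro a _
  unfold Spec_shr_one shr_one shr_one_alt
  by_cases ha : 0 < a
  · have := shr_one_loop_inv a ha 0 le_rfl (by omega)
    simpa [ha] using this
  · have : PySem.List.pyRange 0 a 1 = [] := by
      simp [PySem.List.pyRange]; omega
    simp [this, shr_one_loop, ha]
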